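-- pv_equiv track=rewrite | github.com/gehaxelt/MasterThesis-FPNET | fpnet/logs/security_analyzer.py | resp2headers
-- ===== SOURCE A (Python) =====
-- def resp2headers(r):
--     hsts = False
--     csp = False
--     cto = False
--     refp = False
--     for h in r['headers']:
--         h = h.lower()
--         if h == 'Strict-Transport-Security'.lower():
--             hsts = True
--         elif h == 'Content-Security-Policy'.lower():
--             csp = True
--         elif h == 'X-Content-Type-Options'.lower():
--             cto = True
--         elif h == 'Referrer-Policy'.lower():
--             refp = True
--     return hsts, csp, cto, refp
-- ===== SOURCE B (Python) =====
-- def resp2headers(r):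
--     names = ('strict-transport-security', 'content-security-policy',
--              'x-content-type-options', 'referrer-policy')
--     return tuple(any(h.lower() == n for h in r['headers']) for n in names)
-- ===== Notes on version B (the rewrite author's own statement) =====
-- stated objective: alternative
-- what changed: Inverts the loop nesting: instead of one pass over the headers flipping four flags through an elif chain, B runs four independent short-circuiting any-scans over the headers, one per target name, and assembles the tuple from them.
import Mathlib
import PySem

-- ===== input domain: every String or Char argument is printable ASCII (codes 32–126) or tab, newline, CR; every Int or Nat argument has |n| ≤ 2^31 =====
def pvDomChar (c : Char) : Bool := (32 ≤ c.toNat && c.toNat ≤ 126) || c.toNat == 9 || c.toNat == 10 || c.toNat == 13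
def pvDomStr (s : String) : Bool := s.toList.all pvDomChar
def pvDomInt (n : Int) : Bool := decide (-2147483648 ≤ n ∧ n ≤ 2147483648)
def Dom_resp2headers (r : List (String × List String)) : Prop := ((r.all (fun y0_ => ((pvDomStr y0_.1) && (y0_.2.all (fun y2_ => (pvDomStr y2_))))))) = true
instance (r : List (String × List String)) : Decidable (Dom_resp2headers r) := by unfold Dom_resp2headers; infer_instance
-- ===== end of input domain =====

-- B inverts the loop nesting: four independent per-name any-scans over the headers instead of
-- A's single per-header pass flipping four flags through an elif chain (alternative; same cost).

-- ===== PORT A =====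
-- the elif-chain loop body of A, flipping one of four flags per matching header
def respAStep (st : Bool × Bool × Bool × Bool) (h : String) : Bool × Bool × Bool × Bool :=
  let hl := PySem.Str.lower h
  if hl = PySem.Str.lower "Strict-Transport-Security" then (true, st.2.1, st.2.2.1, st.2.2.2)
  else if hl = PySem.Str.lower "Content-Security-Policy" then (st.1, true, st.2.2.1, st.2.2.2)
  else if hl = PySem.Str.lower "X-Content-Type-Options" then (st.1, st.2.1, true, st.2.2.2)
  else if hl = PySem.Str.lower "Referrer-Policy" then (st.1, st.2.1, st.2.2.1, true)
  else st

def resp2headers (r : List (String × List String)) : Bool × Bool × Bool × Bool :=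
  match (PySem.Dict.mk r).get? "headers" with
  | none => (false, false, false, false)  -- Python raises KeyError here; excluded by Pre_
  | some hs => hs.foldl respAStep (false, false, false, false)

-- ===== PORT B =====
-- B's inner generator: any(h.lower() == n for h in headers)
def respBHas (hs : List String) (n : String) : Bool :=
  hs.any (fun h => PySem.Str.lower h == n)

def resp2headers_alt (r : List (String × List String)) : Bool × Bool × Bool × Bool :=
  match (PySem.Dict.mk r).get? "headers" with
  | none => (false, false, false, false)  -- Python raises KeyError here; excluded by Pre_
  | some hs =>
    (respBHas hs "strict-transport-security",
     respBHas hs "content-security-policy",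
     respBHas hs "x-content-type-options",
     respBHas hs "referrer-policy")

-- ===== PRECONDITION & SPEC =====
-- Pre_ excludes exactly the inputs without a 'headers' key, on which Python A raises KeyError.
def Pre_resp2headers (r : List (String × List String)) : Prop :=
  ((PySem.Dict.mk r).contains "headers") = true
instance (r : List (String × List String)) : Decidable (Pre_resp2headers r) := by
  unfold Pre_resp2headers; infer_instance

def pvWitness_resp2headers : (List (String × List String)) :=
  [("headers", ["Strict-Transport-Security", "X-Frame-Options"])]

def Spec_resp2headers (r : List (String × List String)) (out : Bool × Bool × Bool × Bool) : Prop := out = resp2headers_alt r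
instance (r : List (String × List String)) (out : Bool × Bool × Bool × Bool) : Decidable (Spec_resp2headers r out) := by unfold Spec_resp2headers; infer_instance

-- ===== CLAIM (what is proved, stated in full; the proofs are below) =====
def Claim_equal_resp2headers : Prop := ∀ (r : List (String × List String)), Dom_resp2headers r → Pre_resp2headers r → Spec_resp2headers r (resp2headers r)

-- ===== LEMMAS AND PROOFS =====

-- A's loop computes, in each component, "initial flag OR some header lowercases to the target name"
lemma respA_loop (hs : List String) (a b c d : Bool) :
    hs.foldl respAStep (a, b, c, d) =
      (a || hs.any (fun h => PySem.Str.lower h == "strict-transport-security"),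
       b || hs.any (fun h => PySem.Str.lower h == "content-security-policy"),
       c || hs.any (fun h => PySem.Str.lower h == "x-content-type-options"),
       d || hs.any (fun h => PySem.Str.lower h == "referrer-policy")) := by
  induction hs generalizing a b c d with
  | nil => simp
  | cons h t ih =>
    have e1 : PySem.Str.lower "Strict-Transport-Security" = "strict-transport-security" := by decide
    have e2 : PySem.Str.lower "Content-Security-Policy" = "content-security-policy" := by decide
    have e3 : PySem.Str.lower "X-Content-Type-Options" = "x-content-type-options" := by decide
    have e4 : PySem.Str.lower "Referrer-Policy" = "referrer-policy" := by decide
    simp only [List.foldl_cons, List.any_cons, respAStep, e1, e2, e3, e4]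
    by_cases h1 : PySem.Str.lower h = "strict-transport-security" <;>
      by_cases h2 : PySem.Str.lower h = "content-security-policy" <;>
        by_cases h3 : PySem.Str.lower h = "x-content-type-options" <;>
          by_cases h4 : PySem.Str.lower h = "referrer-policy" <;>
            simp [h1, h2, h3, h4, ih, beq_eq_decide]

-- ===== VERDICT (by name: the statement is the Claim_ definition above) =====
theorem resp2headers_spec : Claim_equal_resp2headers := by
  intro r _ hpre
  unfold Spec_resp2headers resp2headers resp2headers_alt
  cases hget : (PySem.Dict.mk r).get? "headers" with
  | none =>
    exact absurd (hpre.symm.trans (PySem.Dict.contains_eq_isSome_get? _ _)) (by simp [hget])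
  | some hs =>
    simp [respA_loop, respBHas]
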